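-- pv_equiv track=rewrite | github.com/davedotluebke/old-skool-text-game | parse.py | _split_and_simplify
-- ===== SOURCE A (Python) =====
-- def _split_and_simplify(s):
--     """Split command into words using whitespace, remove articles
--     ('a' and 'the'), and convert to lowercase -- but don't modify
--     "strings" of text between quotes; treat these as 1 word.  More
--     precisely: treat the contents of any string literals (sequences
--     of text demarcated with the double-quote `"` character) as a
--     single word with the demarcation characters stripped. Thus if `s`
--     consists of:
--         Tell the troll "Let me pass!"
--     the function will return:
--         ['Tell', 'the', 'troll', 'Let me pass!']
--     The final `"` is actually optional, and no word will be returned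
--     for empty strings. Note that we only support `"` to demarcate strings,
--     not `'`. Nor does this function handle nesting of strings: If a
--     string literal demarcated with `"` contains a nested string
--     demarcated with `'`, that nested string is simply treated as part
--     of the encompassing string's single "word". This is helpful for the
--     wizardly 'execute' command, which allows the wizard to type valid
--     Python commands to execute in the parser--by using `'` to indicate
--     strings inside the command, the wizard avoids escaping quotation
--     marks. TODO: support escaping quotes with the backslash character."""
--     words = []
--     sections = s.split('"')  # split s into sections inside & outside quotes
--     numsections = len(sections)
--     # Odd-numbered sections are between quotes, e.g <section[0] "section[1]" section[2] "section[3]">: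
--     #   put everything between the quotes into a single word.
--     # Even-numbered sections are outside quotes (including section[0] when are no quotes):
--     #   split these sections into words according to whitespace.
--     for i in range(numsections):
--         if sections[i]:  # skip empty sections
--             if i & 0x1:  # if i is odd (lowest bit set), add section directly as a word
--                 words += [sections[i]]
--             else:  # i is even: convert to lowercase, split by whitespace, strip articles
--                 words += [w for w in sections[i].lower().split() if w not in ['a', 'an', 'the']]
--     return words
-- ===== SOURCE B (Python) =====
-- def _flush_plain(words, current):
--     w = ''.join(current).lower()
--     if w and w not in ('a', 'an', 'the'):
--         words.append(w)
--
-- def _split_and_simplify(s):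
--     """Single-pass character scanner: one token buffer, a quote-mode flag;
--     unquoted tokens are lowercased and article-filtered, quoted ones kept verbatim."""
--     words = []
--     current = []
--     in_quotes = False
--     for ch in s:
--         if ch == '"':
--             if in_quotes:
--                 if current:
--                     words.append(''.join(current))
--             else:
--                 _flush_plain(words, current)
--             current = []
--             in_quotes = not in_quotes
--         elif in_quotes:
--             current.append(ch)
--         elif ch.isspace():
--             _flush_plain(words, current)
--             current = []
--         else:
--             current.append(ch)
--     if in_quotes:
--         if current:
--             words.append(''.join(current))
--     else:
--         _flush_plain(words, current)
--     return words
-- ===== Notes on version B (the rewrite author's own statement) =====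
-- stated objective: alternative
-- what changed: Replaced A's split-on-quote into sections followed by parity-indexed per-section lowercase/whitespace-split/article-filter passes with a single-pass character scanner that keeps one token buffer and an in_quotes flag, flushing tokens as it goes.
import Mathlib
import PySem

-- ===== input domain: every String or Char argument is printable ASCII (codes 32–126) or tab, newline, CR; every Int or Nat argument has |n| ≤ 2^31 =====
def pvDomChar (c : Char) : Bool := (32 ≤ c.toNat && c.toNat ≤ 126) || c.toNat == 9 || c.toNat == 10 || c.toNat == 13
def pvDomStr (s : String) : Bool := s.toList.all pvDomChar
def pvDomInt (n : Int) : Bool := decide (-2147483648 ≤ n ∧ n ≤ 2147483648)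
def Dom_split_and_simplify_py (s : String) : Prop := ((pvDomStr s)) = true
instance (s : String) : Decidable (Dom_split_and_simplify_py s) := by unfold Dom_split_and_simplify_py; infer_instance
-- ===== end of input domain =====

-- B replaces A's split-on-'"' + per-section whitespace-splitting with a single-pass
-- character scanner (token buffer + in_quotes flag); objective: alternative, same cost class.

-- ===== PORT A =====
-- _split_and_simplify: sections = s.split('"'); for i in range(len(sections)): odd sections
-- are one verbatim word, even sections are lowercased, whitespace-split, articles dropped.
def split_and_simplify_py (s : String) : List String :=
  let sections := PySem.Chars.splitOn s.toList ['"']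
  let numsections := sections.length
  (PySem.List.pyRange 0 (numsections : Int) 1).foldl (fun words i =>
    let sec := PySem.List.pyGetD sections i []
    if sec ≠ [] then
      if PySem.Int.band i 1 = 1 then
        words ++ [String.ofList sec]
      else
        words ++ ((PySem.Chars.split₀ (PySem.Chars.lower sec)).filter
          (fun w => !(w == ['a'] || w == ['a', 'n'] || w == ['t', 'h', 'e']))).map String.ofList
    else words) []


-- ===== PORT B =====
-- _flush_plain(words, current): w = ''.join(current).lower(); append w unless empty or an article
def pvFlushPlain (words : List String) (current : List Char) : List String :=
  if (!(PySem.Chars.lower current).isEmpty &&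
      !(PySem.Chars.lower current == ['a'] || PySem.Chars.lower current == ['a', 'n'] ||
        PySem.Chars.lower current == ['t', 'h', 'e'])) then
    words ++ [String.ofList (PySem.Chars.lower current)]
  else words

def pvStep (st : List String × List Char × Bool) (ch : Char) : List String × List Char × Bool :=
  if ch = '"' then
    ((if st.2.2 then (if !st.2.1.isEmpty then st.1 ++ [String.ofList st.2.1] else st.1)
      else pvFlushPlain st.1 st.2.1), [], !st.2.2)
  else if st.2.2 then (st.1, st.2.1 ++ [ch], st.2.2)
  else if PySem.Chars.isspace ch then (pvFlushPlain st.1 st.2.1, [], st.2.2)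
  else (st.1, st.2.1 ++ [ch], st.2.2)

def pvFinish (st : List String × List Char × Bool) : List String :=
  if st.2.2 then (if !st.2.1.isEmpty then st.1 ++ [String.ofList st.2.1] else st.1)
  else pvFlushPlain st.1 st.2.1

def split_and_simplify_py_alt (s : String) : List String :=
  pvFinish (s.toList.foldl pvStep ([], [], false))


-- ===== PRECONDITION & SPEC =====
def Spec_split_and_simplify_py (s : String) (out : List String) : Prop := out = split_and_simplify_py_alt s
instance (s : String) (out : List String) : Decidable (Spec_split_and_simplify_py s out) := by unfold Spec_split_and_simplify_py; infer_instance

-- ===== CLAIM (what is proved, stated in full; the proofs are below) =====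
def Claim_equal_split_and_simplify_py : Prop := ∀ (s : String), Dom_split_and_simplify_py s → Spec_split_and_simplify_py s (split_and_simplify_py s)

-- ===== LEMMAS AND PROOFS =====

-- reference recursions used only by the proofs:
-- pvSplitQ = s.split('"'); pvRefW = s.split(); pvWordsOf = A's even-section treatment;
-- pvProc = A's alternating processing of the section list; pvRun = B's scanner on the remaining input
def pvSplitQ : List Char → List (List Char)
  | [] => [[]]
  | c :: rest =>
    if c = '"' then [] :: pvSplitQ rest
    else (c :: (pvSplitQ rest).headI) :: (pvSplitQ rest).tail

def pvRefW : List Char → List (List Char)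
  | [] => []
  | c :: rest =>
    if PySem.Chars.isspace c then pvRefW rest
    else (c :: rest.takeWhile (fun d => !PySem.Chars.isspace d)) ::
         pvRefW (rest.dropWhile (fun d => !PySem.Chars.isspace d))
  termination_by u => u.length
  decreasing_by all_goals simp only [List.length_cons]
                · omega
                · exact Nat.lt_succ_of_le (List.length_dropWhile_le _ _)

def pvWordsOf (u : List Char) : List String :=
  ((PySem.Chars.split₀ (PySem.Chars.lower u)).filter
    (fun w => !(w == ['a'] || w == ['a', 'n'] || w == ['t', 'h', 'e']))).map String.ofList

def pvProc : Bool → List (List Char) → List String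
  | _, [] => []
  | false, sec :: rest => pvWordsOf sec ++ pvProc true rest
  | true, sec :: rest => (if !sec.isEmpty then [String.ofList sec] else []) ++ pvProc false rest

def pvRun : Bool → List Char → List Char → List String
  | false, cur, [] => pvFlushPlain [] cur
  | true, cur, [] => if !cur.isEmpty then [String.ofList cur] else []
  | false, cur, c :: rest =>
    if c = '"' then pvFlushPlain [] cur ++ pvRun true [] rest
    else if PySem.Chars.isspace c then pvFlushPlain [] cur ++ pvRun false [] rest
    else pvRun false (cur ++ [c]) rest
  | true, cur, c :: rest =>
    if c = '"' then (if !cur.isEmpty then [String.ofList cur] else []) ++ pvRun false [] rest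
    else pvRun true (cur ++ [c]) rest


theorem pvFlushPlain_append (ws : List String) (cur : List Char) :
    pvFlushPlain ws cur = ws ++ pvFlushPlain [] cur := by
  unfold pvFlushPlain; split_ifs <;> simp

theorem pvScan_eq (cs : List Char) : ∀ (ws : List String) (cur : List Char) (inq : Bool),
    pvFinish (cs.foldl pvStep (ws, cur, inq)) = ws ++ pvRun inq cur cs := by
  induction cs with
  | nil =>
    intro ws cur inq
    cases inq
    · show pvFinish (ws, cur, false) = ws ++ pvRun false cur []
      rw [pvRun]
      show pvFlushPlain ws cur = _
      exact pvFlushPlain_append ws cur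
    · show pvFinish (ws, cur, true) = ws ++ pvRun true cur []
      rw [pvRun]
      show (if !cur.isEmpty then ws ++ [String.ofList cur] else ws) = _
      split_ifs <;> simp
  | cons c rest ih =>
    intro ws cur inq
    rw [List.foldl_cons]
    cases inq
    · by_cases hq : c = '"'
      · have hstep : pvStep (ws, cur, false) c = (pvFlushPlain ws cur, [], true) := by
          simp [pvStep, hq]
        rw [hstep, ih, pvRun, if_pos hq, pvFlushPlain_append, List.append_assoc]
      · by_cases hs : PySem.Chars.isspace c
        · have hstep : pvStep (ws, cur, false) c = (pvFlushPlain ws cur, [], false) := by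
            simp [pvStep, hq, hs]
          rw [hstep, ih, pvRun, if_neg hq, if_pos hs, pvFlushPlain_append, List.append_assoc]
        · have hstep : pvStep (ws, cur, false) c = (ws, cur ++ [c], false) := by
            simp [pvStep, hq, hs]
          rw [hstep, ih, pvRun, if_neg hq, if_neg hs]
    · by_cases hq : c = '"'
      · have hstep : pvStep (ws, cur, true) c =
            ((if !cur.isEmpty then ws ++ [String.ofList cur] else ws), [], false) := by
          simp [pvStep, hq]
        rw [hstep, ih, pvRun, if_pos hq]
        split_ifs <;> simp
      · have hstep : pvStep (ws, cur, true) c = (ws, cur ++ [c], true) := by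
          simp [pvStep, hq]
        rw [hstep, ih, pvRun, if_neg hq]

theorem pvB_eq_run (s : String) : split_and_simplify_py_alt s = pvRun false [] s.toList := by
  simpa using pvScan_eq s.toList [] [] false

theorem pvSplitQ_ne_nil (cs : List Char) : pvSplitQ cs ≠ [] := by
  cases cs with
  | nil => simp [pvSplitQ]
  | cons c rest => unfold pvSplitQ; split_ifs <;> simp

theorem pvSplitQ_headI_tail (cs : List Char) :
    (pvSplitQ cs).headI :: (pvSplitQ cs).tail = pvSplitQ cs := by
  rcases hq : pvSplitQ cs with _ | ⟨h, t⟩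
  · exact absurd hq (pvSplitQ_ne_nil cs)
  · rfl

theorem pvSplitOn_go (fuel : Nat) : ∀ (l cur : List Char) (acc : List (List Char)),
    l.length < fuel →
    PySem.Chars.splitOn.go ['"'] fuel l cur acc =
      acc.reverse ++ (cur.reverse ++ (pvSplitQ l).headI) :: (pvSplitQ l).tail := by
  induction fuel with
  | zero => intro l cur acc h; omega
  | succ fuel ih =>
    intro l cur acc h
    cases l with
    | nil => simp [PySem.Chars.splitOn.go, pvSplitQ]
    | cons c rest =>
      rw [PySem.Chars.splitOn.go]
      by_cases hc : c = '"'
      · subst hc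
        rw [if_pos (by simp [List.isPrefixOf])]
        rw [show List.drop (['"'] : List Char).length ('"' :: rest) = rest from rfl]
        rw [ih rest [] (cur.reverse :: acc) (by simp at h ⊢; omega)]
        simp [pvSplitQ, pvSplitQ_headI_tail]
      · rw [if_neg (by simp [List.isPrefixOf]; exact fun h' => absurd h'.symm hc)]
        rw [ih rest (c :: cur) acc (by simp at h ⊢; omega)]
        simp [pvSplitQ, hc]

theorem pvSplitOn_eq (cs : List Char) :
    PySem.Chars.splitOn cs ['"'] = pvSplitQ cs := by
  unfold PySem.Chars.splitOn
  rw [pvSplitOn_go (cs.length + 1) cs [] [] (by omega)]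
  rcases hq : pvSplitQ cs with _ | ⟨h, t⟩
  · exact absurd hq (pvSplitQ_ne_nil cs)
  · simp

theorem pvSplit₀_go (l : List Char) : ∀ (cur : List Char) (acc : List (List Char)),
    PySem.Chars.split₀.go l cur acc =
      acc.reverse ++ (if cur.isEmpty then pvRefW l
        else (cur.reverse ++ l.takeWhile (fun d => !PySem.Chars.isspace d)) ::
             pvRefW (l.dropWhile (fun d => !PySem.Chars.isspace d))) := by
  induction l with
  | nil =>
    intro cur acc
    cases cur <;> simp [PySem.Chars.split₀.go, pvRefW]
  | cons c rest ih =>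
    intro cur acc
    rw [PySem.Chars.split₀.go]
    by_cases hs : PySem.Chars.isspace c
    · rw [if_pos hs]
      cases cur with
      | nil =>
        rw [ih]
        simp [pvRefW, hs]
      | cons a as =>
        rw [if_neg (by simp)]
        rw [ih [] ((a :: as).reverse :: acc)]
        simp [pvRefW, hs]
    · rw [if_neg hs]
      rw [ih (c :: cur) acc]
      cases cur <;> simp [pvRefW, hs]

theorem pvSplit₀_eq (cs : List Char) : PySem.Chars.split₀ cs = pvRefW cs := by
  unfold PySem.Chars.split₀
  rw [pvSplit₀_go cs [] []]
  simp

theorem pvCharOfNat (n : Nat) (h : n < 55296) : (Char.ofNat n).toNat = n := by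
  rw [Char.toNat_ofNat, if_pos (Or.inl h)]

theorem pvIsspace_of_range (c : Char) (h1 : 33 ≤ c.toNat) (h2 : c.toNat ≤ 126) :
    PySem.Chars.isspace c = false := by
  unfold PySem.Chars.isspace
  simp only [Bool.or_eq_false_iff, Bool.and_eq_false_iff, decide_eq_false_iff_not]
  omega

theorem pvIsspace_lowerChar (c : Char) :
    PySem.Chars.isspace (PySem.Chars.lowerChar c) = PySem.Chars.isspace c := by
  unfold PySem.Chars.lowerChar
  by_cases hu : PySem.Chars.isupper c
  · rw [if_pos hu]
    have hc : 65 ≤ c.toNat ∧ c.toNat ≤ 90 := by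
      unfold PySem.Chars.isupper at hu; simp [Char.le_def] at hu; exact hu
    have hv : (Char.ofNat (c.toNat + 32)).toNat = c.toNat + 32 := pvCharOfNat _ (by omega)
    rw [pvIsspace_of_range _ (by omega) (by omega), pvIsspace_of_range _ (by omega) (by omega)]
  · rw [if_neg hu]

theorem pvRefW_spaceless (u : List Char) (h : ∀ d ∈ u, PySem.Chars.isspace d = false)
    (hne : u ≠ []) : pvRefW u = [u] := by
  cases u with
  | nil => exact absurd rfl hne
  | cons c rest =>
    rw [pvRefW]
    rw [if_neg (by simp [h c (by simp)])]
    have ht : rest.takeWhile (fun d => !PySem.Chars.isspace d) = rest :=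
      List.takeWhile_eq_self_iff.mpr (fun a ha => by simp [h a (by simp [ha])])
    have hd : rest.dropWhile (fun d => !PySem.Chars.isspace d) = [] :=
      List.dropWhile_eq_nil_iff.mpr (fun a ha => by simp [h a (by simp [ha])])
    rw [ht, hd, pvRefW]

theorem pvRefW_append_space (n : Nat) : ∀ (u : List Char), u.length ≤ n →
    ∀ (c : Char) (v : List Char), PySem.Chars.isspace c = true →
    pvRefW (u ++ c :: v) = pvRefW u ++ pvRefW v := by
  induction n with
  | zero =>
    intro u hu c v hc
    have : u = [] := List.length_eq_zero_iff.mp (by omega)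
    subst this
    simp [pvRefW, hc]
  | succ n ih =>
    intro u hu c v hc
    cases u with
    | nil => simp [pvRefW, hc]
    | cons d u' =>
      by_cases hd : PySem.Chars.isspace d
      · rw [List.cons_append, pvRefW, if_pos hd, pvRefW, if_pos hd]
        exact ih u' (by simp at hu; omega) c v hc
      · rw [List.cons_append, pvRefW, if_neg hd, pvRefW, if_neg hd]
        by_cases hall : ∀ a ∈ u', (fun d => !PySem.Chars.isspace d) a = true
        · have ht : u'.takeWhile (fun d => !PySem.Chars.isspace d) = u' :=
            List.takeWhile_eq_self_iff.mpr hall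
          have ht2 : (u' ++ c :: v).takeWhile (fun d => !PySem.Chars.isspace d) = u' := by
            rw [List.takeWhile_append, ht]
            simp [hc]
          have hd2 : (u' ++ c :: v).dropWhile (fun d => !PySem.Chars.isspace d) = c :: v := by
            rw [List.dropWhile_append]
            simp [List.dropWhile_eq_nil_iff.mpr hall, hc]
          rw [ht2, hd2, ht, List.dropWhile_eq_nil_iff.mpr hall]
          rw [show pvRefW (c :: v) = pvRefW v from by rw [pvRefW, if_pos hc]]
          rw [show pvRefW ([] : List Char) = [] from by rw [pvRefW]]
          simp
        · push Not at hall
          obtain ⟨a, ha, hsa⟩ := hall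
          have hne : u'.dropWhile (fun d => !PySem.Chars.isspace d) ≠ [] := by
            intro hnil
            exact absurd (List.dropWhile_eq_nil_iff.mp hnil a ha) (by simpa using hsa)
          have ht2 : (u' ++ c :: v).takeWhile (fun d => !PySem.Chars.isspace d) =
              u'.takeWhile (fun d => !PySem.Chars.isspace d) := by
            rw [List.takeWhile_append]
            split_ifs with hl
            · exfalso
              have heq : u'.takeWhile (fun d => !PySem.Chars.isspace d) = u' :=
                (List.takeWhile_prefix _).eq_of_length hl
              exact hne (List.dropWhile_eq_nil_iff.mpr (List.takeWhile_eq_self_iff.mp heq))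
            · rfl
          have hd2 : (u' ++ c :: v).dropWhile (fun d => !PySem.Chars.isspace d) =
              u'.dropWhile (fun d => !PySem.Chars.isspace d) ++ c :: v := by
            rw [List.dropWhile_append]
            simp [hne]
          rw [ht2, hd2]
          rw [ih (u'.dropWhile (fun d => !PySem.Chars.isspace d))
            (by have := List.length_dropWhile_le (fun d => !PySem.Chars.isspace d) u'
                simp at hu; omega) c v hc]
          simp

theorem pvLower_spaceless (cur : List Char) (h : ∀ d ∈ cur, PySem.Chars.isspace d = false) :
    ∀ d ∈ PySem.Chars.lower cur, PySem.Chars.isspace d = false := by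
  intro d hd
  unfold PySem.Chars.lower at hd
  obtain ⟨a, ha, rfl⟩ := List.mem_map.mp hd
  rw [pvIsspace_lowerChar]
  exact h a ha

theorem pvWordsOf_spaceless (cur : List Char) (h : ∀ d ∈ cur, PySem.Chars.isspace d = false) :
    pvWordsOf cur = pvFlushPlain [] cur := by
  unfold pvWordsOf pvFlushPlain
  rw [pvSplit₀_eq]
  cases cur with
  | nil => simp [PySem.Chars.lower, pvRefW]
  | cons a as =>
    rw [pvRefW_spaceless _ (pvLower_spaceless _ h) (by simp [PySem.Chars.lower])]
    have hni : (PySem.Chars.lower (a :: as)).isEmpty = false := by simp [PySem.Chars.lower]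
    rw [List.filter_cons]
    split_ifs with h1 h2 h3 <;> simp_all

theorem pvWordsOf_space_append (cur : List Char) (c : Char) (v : List Char)
    (h : ∀ d ∈ cur, PySem.Chars.isspace d = false) (hc : PySem.Chars.isspace c = true) :
    pvWordsOf (cur ++ c :: v) = pvFlushPlain [] cur ++ pvWordsOf v := by
  have hsplit : PySem.Chars.lower (cur ++ c :: v) =
      PySem.Chars.lower cur ++ PySem.Chars.lowerChar c :: PySem.Chars.lower v := by
    simp [PySem.Chars.lower]
  unfold pvWordsOf
  rw [pvSplit₀_eq, pvSplit₀_eq, hsplit,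
    pvRefW_append_space (PySem.Chars.lower cur).length _ le_rfl _ _
      (by rw [pvIsspace_lowerChar]; exact hc),
    List.filter_append, List.map_append]
  congr 1
  rw [← pvSplit₀_eq, ← pvWordsOf]
  exact pvWordsOf_spaceless cur h

theorem pvMain (cs : List Char) : ∀ (cur : List Char),
    ((∀ d ∈ cur, PySem.Chars.isspace d = false ∧ d ≠ '"') →
      pvRun false cur cs = pvWordsOf (cur ++ (pvSplitQ cs).headI) ++ pvProc true (pvSplitQ cs).tail)
    ∧ (pvRun true cur cs = (if !(cur ++ (pvSplitQ cs).headI).isEmpty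
          then [String.ofList (cur ++ (pvSplitQ cs).headI)] else []) ++ pvProc false (pvSplitQ cs).tail) := by
  induction cs with
  | nil =>
    intro cur
    constructor
    · intro h
      rw [pvRun, pvSplitQ]
      simp only [List.headI_cons, List.tail_cons, List.append_nil, pvProc, List.append_nil]
      exact (pvWordsOf_spaceless cur (fun d hd => (h d hd).1)).symm
    · rw [pvRun, pvSplitQ]
      simp [pvProc]
  | cons c rest ih =>
    intro cur
    rcases hq : pvSplitQ rest with _ | ⟨h', t'⟩
    · exact absurd hq (pvSplitQ_ne_nil rest)
    constructor
    · intro h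
      by_cases hcq : c = '"'
      · rw [pvRun, if_pos hcq, pvSplitQ, if_pos hcq, hq]
        simp only [List.headI_cons, List.tail_cons, List.append_nil, pvProc]
        have hr := ((ih []).2)
        rw [hq] at hr
        simp only [List.headI_cons, List.tail_cons, List.nil_append] at hr
        rw [hr, pvWordsOf_spaceless cur (fun d hd => (h d hd).1)]
      · by_cases hcs : PySem.Chars.isspace c
        · rw [pvRun, if_neg hcq, if_pos hcs, pvSplitQ, if_neg hcq, hq]
          simp only [List.headI_cons, List.tail_cons]
          have hr := ((ih []).1) (by simp)
          rw [hq] at hr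
          simp only [List.headI_cons, List.tail_cons, List.nil_append] at hr
          rw [hr, pvWordsOf_space_append cur c h' (fun d hd => (h d hd).1) hcs]
          simp
        · rw [pvRun, if_neg hcq, if_neg hcs, pvSplitQ, if_neg hcq, hq]
          simp only [List.headI_cons, List.tail_cons]
          have hr := ((ih (cur ++ [c])).1) (by
            intro d hd
            rcases List.mem_append.mp hd with hd1 | hd2
            · exact h d hd1
            · simp at hd2; subst hd2; exact ⟨by simpa using hcs, hcq⟩)
          rw [hq] at hr
          simp only [List.headI_cons, List.tail_cons] at hr
          rw [hr]
          simp
    · by_cases hcq : c = '"'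
      · rw [pvRun, if_pos hcq, pvSplitQ, if_pos hcq, hq]
        simp only [List.headI_cons, List.tail_cons, List.append_nil, pvProc]
        have hr := ((ih []).1) (by simp)
        rw [hq] at hr
        simp only [List.headI_cons, List.tail_cons, List.nil_append] at hr
        rw [hr]
      · rw [pvRun, if_neg hcq, pvSplitQ, if_neg hcq, hq]
        simp only [List.headI_cons, List.tail_cons]
        have hr := ((ih (cur ++ [c])).2)
        rw [hq] at hr
        simp only [List.headI_cons, List.tail_cons] at hr
        rw [hr]
        simp

theorem pvRangeFold (sections : List (List Char)) (secs : List (List Char)) :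
    ∀ (k : Nat) (ws : List String), sections.drop k = secs → k + secs.length = sections.length →
    (PySem.List.pyRange (k : Int) (sections.length : Int) 1).foldl (fun words i =>
      let sec := PySem.List.pyGetD sections i []
      if sec ≠ [] then
        if PySem.Int.band i 1 = 1 then
          words ++ [String.ofList sec]
        else
          words ++ ((PySem.Chars.split₀ (PySem.Chars.lower sec)).filter
            (fun w => !(w == ['a'] || w == ['a', 'n'] || w == ['t', 'h', 'e']))).map String.ofList
      else words) ws = ws ++ pvProc (decide (k % 2 = 1)) secs := by
  induction secs with
  | nil =>
    intro k ws hdrop hlen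
    rw [PySem.List.pyRange_one_eq_nil (by simp at hlen; omega)]
    simp [pvProc]
  | cons sec rest ih =>
    intro k ws hdrop hlen
    have hk : k < sections.length := by simp at hlen; omega
    rw [PySem.List.pyRange_one_cons (by exact_mod_cast hk)]
    rw [List.foldl_cons]
    have hget : PySem.List.pyGetD sections (k : Int) [] = sec := by
      rw [PySem.List.pyGetD_natCast, List.getD_eq_getElem?_getD, ← List.head?_drop, hdrop]
      rfl
    have hdrop' : sections.drop (k + 1) = rest := by
      rw [← List.drop_drop]  -- drop 1 (drop k)
      rw [hdrop]
      rfl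
    have hband : PySem.Int.band (k : Int) 1 = ((k % 2 : Nat) : Int) := by
      rw [PySem.Int.band_one]
      exact_mod_cast PySem.Int.mod_natCast k 2
    have hcast : ((k : Int) + 1) = ((k + 1 : Nat) : Int) := by push_cast; ring
    have hihx := ih (k + 1) ((fun words i =>
      let sec := PySem.List.pyGetD sections i []
      if sec ≠ [] then
        if PySem.Int.band i 1 = 1 then words ++ [String.ofList sec]
        else words ++ ((PySem.Chars.split₀ (PySem.Chars.lower sec)).filter
          (fun w => !(w == ['a'] || w == ['a', 'n'] || w == ['t', 'h', 'e']))).map String.ofList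
      else words) ws (k : Int)) hdrop' (by simp at hlen ⊢; omega)
    rw [hcast, hihx]
    simp only [hget, hband]
    by_cases hpar : k % 2 = 1
    · have hpar1 : ((k % 2 : Nat) : Int) = 1 := by rw [hpar]; rfl
      have hpar' : (k + 1) % 2 = 0 := by omega
      simp only [hpar, hpar', decide_true]
      rw [show (decide (0 = 1)) = false from rfl]
      by_cases hsec : sec = []
      · subst hsec
        simp [pvProc]
      · simp [pvProc, hsec, List.isEmpty_eq_false_iff.mpr hsec]
    · have hk2 : k % 2 = 0 := by omega
      have hpar0 : ¬ ((k % 2 : Nat) : Int) = 1 := by rw [hk2]; decide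
      have hpar' : (k + 1) % 2 = 1 := by omega
      simp only [hpar', decide_true, if_neg hpar0]
      rw [show (decide (k % 2 = 1)) = false from by simp [hpar]]
      by_cases hsec : sec = []
      · subst hsec
        simp [pvProc, pvWordsOf, pvSplit₀_eq]
        simp [PySem.Chars.lower, pvRefW]
      · simp only [if_pos hsec, pvProc]
        rw [pvWordsOf]
        simp

theorem pvAside (s : String) :
    split_and_simplify_py s = pvProc false (pvSplitQ s.toList) := by
  unfold split_and_simplify_py
  rw [pvSplitOn_eq]
  rw [show ((0 : Int) = ((0 : Nat) : Int)) from rfl]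
  rw [pvRangeFold (pvSplitQ s.toList) (pvSplitQ s.toList) 0 [] (by simp) (by simp)]
  simp

theorem split_and_simplify_py_spec' (s : String) :
    split_and_simplify_py s = split_and_simplify_py_alt s := by
  rw [pvB_eq_run, pvAside]
  rcases hq : pvSplitQ s.toList with _ | ⟨h, t⟩
  · exact absurd hq (pvSplitQ_ne_nil s.toList)
  · have hm := (pvMain s.toList []).1 (by simp)
    rw [hq] at hm
    simp only [List.headI_cons, List.tail_cons, List.nil_append] at hm
    rw [hm, pvProc]

-- ===== VERDICT (by name: the statement is the Claim_ definition above) =====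
theorem split_and_simplify_py_spec : Claim_equal_split_and_simplify_py := by
  intro s _
  unfold Spec_split_and_simplify_py
  exact split_and_simplify_py_spec' s
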